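-- pv_equiv track=rewrite | github.com/n0thingNoob/AI4SE_assignment1 | src/modeling/predict.py | window_by_lines_with_index
-- ===== SOURCE A (Python) =====
-- MASK = "<IFMASK>"
--
-- def window_by_lines_with_index(text: str, before: int, after: int):
--     """Return window around <IFMASK> line and the line index of <IFMASK> in the window."""
--     if not text:
--         return "", -1
--     pos = text.find(MASK)
--     lines = text.splitlines(True)
--     if pos == -1:
--         keep = before + after + 1
--         return ("".join(lines[-keep:]) if keep < len(lines) else "".join(lines)), -1
--     cum = 0
--     hit = 0
--     for i, ln in enumerate(lines):
--         cum += len(ln)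
--         if cum > pos:
--             hit = i
--             break
--     start = max(0, hit - before)
--     end = min(len(lines), hit + after + 1)
--     return "".join(lines[start:end]), (hit - start)
-- ===== SOURCE B (Python) =====
-- MASK = "<IFMASK>"
--
-- def window_by_lines_with_index(text: str, before: int, after: int):
--     """Return window around <IFMASK> line and the line index of <IFMASK> in the window."""
--     if not text:
--         return "", -1
--     lines = text.splitlines(True)
--     hit = -1
--     for i, ln in enumerate(lines):
--         if MASK in ln:
--             hit = i
--             break
--     if hit == -1:
--         return "".join(lines[-(before + after + 1):]), -1
--     start = max(0, hit - before)
--     return "".join(lines[start: hit + after + 1]), hit - start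
-- ===== Notes on version B (the rewrite author's own statement) =====
-- stated objective: simpler
-- what changed: B drops text.find and the cumulative character-length accumulator: it locates the marker line as the first split line containing MASK, and collapses the not-found branch to a single tail slice lines[-(before+after+1):] (Python slice clamping makes A's keep<len guard and the min() on the end bound redundant).
import Mathlib
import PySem

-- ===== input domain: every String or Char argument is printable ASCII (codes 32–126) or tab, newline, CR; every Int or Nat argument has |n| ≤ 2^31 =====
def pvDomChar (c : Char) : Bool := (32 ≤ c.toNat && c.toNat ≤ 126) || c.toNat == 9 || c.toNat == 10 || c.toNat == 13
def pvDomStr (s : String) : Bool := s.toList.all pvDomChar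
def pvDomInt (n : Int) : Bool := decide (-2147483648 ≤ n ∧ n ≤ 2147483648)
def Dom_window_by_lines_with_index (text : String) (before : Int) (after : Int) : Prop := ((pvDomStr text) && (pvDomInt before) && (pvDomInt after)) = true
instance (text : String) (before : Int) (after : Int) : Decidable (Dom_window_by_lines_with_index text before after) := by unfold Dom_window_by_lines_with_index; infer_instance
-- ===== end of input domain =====

-- B locates the marker line by scanning the split lines for MASK instead of A's text.find
-- plus cumulative-length loop, and collapses A's guarded not-found branch to one tail slice
-- (objective: simpler; same return value everywhere).

-- ===== PORT A =====
-- module constant MASK = "<IFMASK>"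
def pvMask : String := "<IFMASK>"

-- Hand port of Python s.splitlines(True) (keepends). Exact on the stated domain: its
-- characters are printable ASCII plus tab/newline/CR, so '\n', '\r\n' and '\r' are the
-- only line breaks that can occur. pvLineSplit peels one line (with its line break).
def pvLineSplit : List Char → List Char × List Char
  | [] => ([], [])
  | c :: rest =>
    if c = '\n' then (['\n'], rest)
    else if c = '\r' then
      if rest.head? = some '\n' then (['\r', '\n'], rest.tail) else (['\r'], rest)
    else ((c :: (pvLineSplit rest).1), (pvLineSplit rest).2)

theorem pvLineSplit_snd_lt : ∀ (s : List Char), s ≠ [] → (pvLineSplit s).2.length < s.length := by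
  intro s hs
  induction s with
  | nil => simp at hs
  | cons c rest ih =>
    simp only [pvLineSplit]
    split_ifs with h1 h2 h3
    · simp
    · cases rest with
      | nil => simp at h3
      | cons d rest' => simp_all
    · simp
    · rcases eq_or_ne rest [] with hr | hr
      · subst hr; simp [pvLineSplit]
      · have := ih hr; simpa using Nat.lt_succ_of_lt this

-- Hand port of Python text.splitlines(True): repeatedly peel one line.
def pvSplitKeep (s : List Char) : List (List Char) :=
  if h : s = [] then [] else (pvLineSplit s).1 :: pvSplitKeep (pvLineSplit s).2
termination_by s.length
decreasing_by exact pvLineSplit_snd_lt s h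

-- A's `for i, ln in enumerate(lines): cum += len(ln); if cum > pos: hit = i; break`
-- (hit = 0 if the loop falls through, as in A).
def pvHitLoop (pos : Int) : List (List Char) → Int → Int → Int
  | [], _, _ => 0
  | ln :: rest, cum, i =>
    if cum + (ln.length : Int) > pos then i else pvHitLoop pos rest (cum + (ln.length : Int)) (i + 1)

def window_by_lines_with_index (text : String) (before : Int) (after : Int) : String × Int :=
  if text.toList = [] then ("", -1)
  else
    let pos := PySem.Str.find text pvMask
    let lines := pvSplitKeep text.toList
    if pos = -1 then
      let keep := before + after + 1
      (if keep < (lines.length : Int) then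
          String.mk (PySem.Chars.join [] (PySem.List.slice lines (some (-keep)) none))
        else String.mk (PySem.Chars.join [] lines), -1)
    else
      let hit := pvHitLoop pos lines 0 0
      let start := max 0 (hit - before)
      let stop := min (lines.length : Int) (hit + after + 1)
      (String.mk (PySem.Chars.join [] (PySem.List.slice lines (some start) (some stop))), hit - start)

-- ===== PORT B =====
-- B's `for i, ln in enumerate(lines): if MASK in ln: hit = i; break` with hit = -1 default.
def pvHitScan (m : List Char) : List (List Char) → Int → Int
  | [], _ => -1
  | ln :: rest, i => if PySem.Chars.isIn m ln then i else pvHitScan m rest (i + 1)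

def window_by_lines_with_index_alt (text : String) (before : Int) (after : Int) : String × Int :=
  if text.toList = [] then ("", -1)
  else
    let lines := pvSplitKeep text.toList
    let hit := pvHitScan pvMask.toList lines 0
    if hit = -1 then
      (String.mk (PySem.Chars.join [] (PySem.List.slice lines (some (-(before + after + 1))) none)), -1)
    else
      let start := max 0 (hit - before)
      (String.mk (PySem.Chars.join [] (PySem.List.slice lines (some start) (some (hit + after + 1)))), hit - start)

-- ===== PRECONDITION & SPEC =====
def Spec_window_by_lines_with_index (text : String) (before : Int) (after : Int) (out : String × Int) : Prop := out = window_by_lines_with_index_alt text before after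
instance (text : String) (before : Int) (after : Int) (out : String × Int) : Decidable (Spec_window_by_lines_with_index text before after out) := by unfold Spec_window_by_lines_with_index; infer_instance

-- ===== CLAIM (what is proved, stated in full; the proofs are below) =====
def Claim_equal_window_by_lines_with_index : Prop := ∀ (text : String) (before : Int) (after : Int), Dom_window_by_lines_with_index text before after → Spec_window_by_lines_with_index text before after (window_by_lines_with_index text before after)

-- ===== LEMMAS AND PROOFS =====

theorem pvLineSplit_append (s : List Char) : (pvLineSplit s).1 ++ (pvLineSplit s).2 = s := by
  induction s with
  | nil => simp [pvLineSplit]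
  | cons c rest ih =>
    simp only [pvLineSplit]
    split_ifs with h1 h2 h3
    · simp [h1]
    · cases rest with
      | nil => simp at h3
      | cons d rest' => simp_all
    · simp [h2]
    · simpa using ih

theorem pvLineSplit_fst_ne (s : List Char) (hs : s ≠ []) : (pvLineSplit s).1 ≠ [] := by
  cases s with
  | nil => simp at hs
  | cons c rest =>
    simp only [pvLineSplit]
    split_ifs <;> simp

theorem pvLineSplit_last (s : List Char) (hr : (pvLineSplit s).2 ≠ []) :
    ∃ t b, (pvLineSplit s).1 = t ++ [b] ∧ (b = '\n' ∨ b = '\r') := by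
  induction s with
  | nil => simp [pvLineSplit] at hr
  | cons c rest ih =>
    simp only [pvLineSplit] at hr ⊢
    split_ifs with h1 h2 h3
    · exact ⟨[], '\n', by simp, Or.inl rfl⟩
    · exact ⟨['\r'], '\n', by simp, Or.inl rfl⟩
    · exact ⟨[], '\r', by simp, Or.inr rfl⟩
    · simp only [if_neg h1, if_neg h2] at hr
      obtain ⟨t, b, ht, hb⟩ := ih hr
      exact ⟨c :: t, b, by simp [ht], hb⟩

theorem pvSplitKeep_cons (s : List Char) (hs : s ≠ []) :
    pvSplitKeep s = (pvLineSplit s).1 :: pvSplitKeep (pvLineSplit s).2 := by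
  rw [pvSplitKeep]; simp [hs]

theorem pvDropAppendLeft {α : Type} (l r : List α) (k : ℕ) (hk : k ≤ l.length) :
    (l ++ r).drop k = l.drop k ++ r := by
  rw [List.drop_append, Nat.sub_eq_zero_of_le hk, List.drop_zero]

theorem pvDropAppendRight {α : Type} (l r : List α) (k : ℕ) (hk : l.length ≤ k) :
    (l ++ r).drop k = r.drop (k - l.length) := by
  rw [List.drop_append, List.drop_eq_nil_of_le hk, List.nil_append]

theorem pvLineSplit_length (s : List Char) :
    (pvLineSplit s).1.length + (pvLineSplit s).2.length = s.length := by
  conv_rhs => rw [← pvLineSplit_append s]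
  rw [List.length_append]

-- an occurrence of a break-free pattern starting strictly inside a kept line lies inside it
theorem occ_in_left (m l r : List Char) (hbf : ∀ c ∈ m, c ≠ '\n' ∧ c ≠ '\r')
    (hlast : r ≠ [] → ∃ t b, l = t ++ [b] ∧ (b = '\n' ∨ b = '\r'))
    (p : ℕ) (hp : p < l.length) (hocc : m <+: (l ++ r).drop p) : m <+: l.drop p := by
  rcases eq_or_ne r [] with hr | hr
  · simpa [hr] using hocc
  · by_cases hfit : p + m.length ≤ l.length
    · have hdrop : (l ++ r).drop p = l.drop p ++ r := by
        rw [List.drop_append, Nat.sub_eq_zero_of_le (le_of_lt hp), List.drop_zero]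
      rw [hdrop] at hocc
      have hlen : m.length ≤ (l.drop p).length := by simp [List.length_drop]; omega
      have heq := List.prefix_iff_eq_take.mp hocc
      rw [List.take_append_of_le_length hlen] at heq
      rw [heq]; exact List.take_prefix _ _
    · exfalso
      obtain ⟨t, b, hl, hb⟩ := hlast hr
      have hll : l.length = t.length + 1 := by simp [hl]
      have hi0 : l.length - 1 - p < m.length := by omega
      have h1 := hocc.getElem (i := l.length - 1 - p) hi0
      rw [List.getElem_drop] at h1
      have hidx : p + (l.length - 1 - p) = t.length := by omega
      simp only [hidx] at h1
      have h2 : (l ++ r)[t.length]'(by simp; omega) = b := by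
        rw [List.getElem_append_left (by omega)]
        subst hl; simp
      have hbm : b ∈ m := by
        have h3 : m[l.length - 1 - p]'hi0 = b := h1.trans h2
        exact h3 ▸ List.getElem_mem hi0
      obtain ⟨hbn, hbr⟩ := hbf b hbm
      rcases hb with h | h
      · exact hbn h
      · exact hbr h

theorem find_eq_of_first (s m : List Char) (q : ℕ) (h1 : m <+: s.drop q)
    (h2 : ∀ i < q, ¬ m <+: s.drop i) : PySem.Chars.find s m = q := by
  have hinf : m <:+: s := (h1.isInfix).trans (List.drop_suffix q s).isInfix
  have hnn := (PySem.Chars.find_nonneg_iff s m).mpr hinf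
  obtain ⟨hocc, hmin⟩ := PySem.Chars.find_spec hnn
  have hq : (PySem.Chars.find s m).toNat = q := by
    rcases lt_trichotomy (PySem.Chars.find s m).toNat q with h | h | h
    · exact absurd hocc (h2 _ h)
    · exact h
    · exact absurd h1 (hmin q h)
  omega

theorem hit_eq (m : List Char) (hm : m ≠ []) (hbf : ∀ c ∈ m, c ≠ '\n' ∧ c ≠ '\r') :
    ∀ (s : List Char) (cum i : Int), PySem.Chars.isIn m s = true →
      pvHitLoop (cum + PySem.Chars.find s m) (pvSplitKeep s) cum i = pvHitScan m (pvSplitKeep s) i := by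
  have main : ∀ (n : ℕ) (s : List Char), s.length = n → ∀ (cum i : Int), PySem.Chars.isIn m s = true →
      pvHitLoop (cum + PySem.Chars.find s m) (pvSplitKeep s) cum i = pvHitScan m (pvSplitKeep s) i := by
    intro n
    induction n using Nat.strong_induction_on with
    | _ n ih =>
      intro s hsn cum i hin
      have hs : s ≠ [] := by
        intro h; subst h
        rw [PySem.Chars.isIn_iff_infix] at hin
        simp only [List.infix_nil] at hin
        exact hm hin
      have hlr : (pvLineSplit s).1 ++ (pvLineSplit s).2 = s := pvLineSplit_append s
      have hlne : (pvLineSplit s).1 ≠ [] := pvLineSplit_fst_ne s hs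
      have hm1 : 0 < m.length := List.length_pos_of_ne_nil hm
      rw [pvSplitKeep_cons s hs]
      have hf0 : 0 ≤ PySem.Chars.find s m :=
        (PySem.Chars.find_nonneg_iff s m).mpr ((PySem.Chars.isIn_iff_infix m s).mp hin)
      obtain ⟨hocc, hmin⟩ := PySem.Chars.find_spec hf0
      have hfnat : PySem.Chars.find s m = ((PySem.Chars.find s m).toNat : Int) :=
        (Int.toNat_of_nonneg hf0).symm
      by_cases hIl : PySem.Chars.isIn m (pvLineSplit s).1 = true
      · obtain ⟨j, hj⟩ := (PySem.Chars.exists_prefix_drop_iff_isIn m (pvLineSplit s).1).mpr hIl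
        have hjlt : j < (pvLineSplit s).1.length := by
          have := hj.length_le; simp only [List.length_drop] at this; omega
        have hjs : m <+: s.drop j := by
          have hd := pvDropAppendLeft (pvLineSplit s).1 (pvLineSplit s).2 j (le_of_lt hjlt)
          rw [hlr] at hd
          rw [hd]; exact hj.trans (List.prefix_append _ _)
        have hfle : (PySem.Chars.find s m).toNat ≤ j := by
          by_contra h; exact hmin j (by omega) hjs
        simp only [pvHitLoop, pvHitScan, hIl, if_true]
        rw [if_pos (by rw [hfnat]; push_cast; omega)]
      · have hfge : (pvLineSplit s).1.length ≤ (PySem.Chars.find s m).toNat := by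
          by_contra h
          push_neg at h
          have hocc2 := occ_in_left m (pvLineSplit s).1 (pvLineSplit s).2 hbf (pvLineSplit_last s)
            (PySem.Chars.find s m).toNat h (by rw [hlr]; exact hocc)
          exact hIl ((PySem.Chars.exists_prefix_drop_iff_isIn m (pvLineSplit s).1).mp ⟨_, hocc2⟩)
        have hsdrop : s.drop (PySem.Chars.find s m).toNat
            = (pvLineSplit s).2.drop ((PySem.Chars.find s m).toNat - (pvLineSplit s).1.length) := by
          have hd := pvDropAppendRight (pvLineSplit s).1 (pvLineSplit s).2 (PySem.Chars.find s m).toNat hfge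
          rw [hlr] at hd
          exact hd
        have hoccr : m <+: (pvLineSplit s).2.drop ((PySem.Chars.find s m).toNat - (pvLineSplit s).1.length) := by
          rw [← hsdrop]; exact hocc
        have hinr : PySem.Chars.isIn m (pvLineSplit s).2 = true :=
          (PySem.Chars.exists_prefix_drop_iff_isIn m (pvLineSplit s).2).mp ⟨_, hoccr⟩
        have hfr : PySem.Chars.find (pvLineSplit s).2 m
            = (((PySem.Chars.find s m).toNat - (pvLineSplit s).1.length : ℕ) : Int) := by
          apply find_eq_of_first
          · exact hoccr
          · intro j hjq hpre
            apply hmin ((pvLineSplit s).1.length + j) (by omega)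
            have hd := pvDropAppendRight (pvLineSplit s).1 (pvLineSplit s).2
              ((pvLineSplit s).1.length + j) (by omega)
            rw [hlr] at hd
            rw [hd, Nat.add_sub_cancel_left]
            exact hpre
        simp only [pvHitLoop, pvHitScan, hIl, Bool.false_eq_true, if_false]
        rw [if_neg (by rw [hfnat]; push_cast; omega)]
        have harr : cum + PySem.Chars.find s m
            = (cum + ((pvLineSplit s).1.length : Int)) + PySem.Chars.find (pvLineSplit s).2 m := by
          rw [hfr, hfnat]; push_cast; omega
        rw [harr]
        have hrlt : (pvLineSplit s).2.length < n := by
          have h1 := pvLineSplit_length s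
          have h2 : 0 < (pvLineSplit s).1.length := List.length_pos_of_ne_nil hlne
          omega
        exact ih (pvLineSplit s).2.length hrlt (pvLineSplit s).2 rfl _ _ hinr
  intro s cum i hin
  exact main s.length s rfl cum i hin

theorem notfound_iff (m : List Char) (hm : m ≠ []) (hbf : ∀ c ∈ m, c ≠ '\n' ∧ c ≠ '\r') :
    ∀ (s : List Char), PySem.Chars.isIn m s = false ↔ ∀ l ∈ pvSplitKeep s, PySem.Chars.isIn m l = false := by
  have main : ∀ (n : ℕ) (s : List Char), s.length = n →
      (PySem.Chars.isIn m s = false ↔ ∀ l ∈ pvSplitKeep s, PySem.Chars.isIn m l = false) := by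
    intro n
    induction n using Nat.strong_induction_on with
    | _ n ih =>
      intro s hsn
      rcases eq_or_ne s [] with hs | hs
      · subst hs
        constructor
        · intro _ l hl; simp [pvSplitKeep] at hl
        · intro _
          rw [PySem.Chars.isIn_eq_false_iff]
          intro hinf
          rw [List.infix_nil] at hinf
          exact hm hinf
      · have hlr : (pvLineSplit s).1 ++ (pvLineSplit s).2 = s := pvLineSplit_append s
        have hlne : (pvLineSplit s).1 ≠ [] := pvLineSplit_fst_ne s hs
        have hm1 : 0 < m.length := List.length_pos_of_ne_nil hm
        have hrlt : (pvLineSplit s).2.length < n := by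
          have h1 := pvLineSplit_length s
          have h2 : 0 < (pvLineSplit s).1.length := List.length_pos_of_ne_nil hlne
          omega
        rw [pvSplitKeep_cons s hs]
        constructor
        · intro hin l hl
          rw [List.mem_cons] at hl
          have hin' : ¬ m <:+: s := (PySem.Chars.isIn_eq_false_iff m s).mp hin
          rcases hl with hl | hl
          · subst hl
            rw [PySem.Chars.isIn_eq_false_iff]
            intro hinf
            exact hin' (hinf.trans ((hlr ▸ List.prefix_append (pvLineSplit s).1 (pvLineSplit s).2).isInfix))
          · have hrf : PySem.Chars.isIn m (pvLineSplit s).2 = false := by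
              rw [PySem.Chars.isIn_eq_false_iff]
              intro hinf
              exact hin' (hinf.trans ((hlr ▸ (List.suffix_append (pvLineSplit s).1 (pvLineSplit s).2)).isInfix))
            exact ((ih (pvLineSplit s).2.length hrlt (pvLineSplit s).2 rfl).mp hrf) l hl
        · intro hall
          have hlf : PySem.Chars.isIn m (pvLineSplit s).1 = false := hall _ (by simp)
          have hrf : PySem.Chars.isIn m (pvLineSplit s).2 = false :=
            (ih (pvLineSplit s).2.length hrlt (pvLineSplit s).2 rfl).mpr
              (fun l hl => hall l (by simp [hl]))
          rw [PySem.Chars.isIn_eq_false_iff]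
          intro hinf
          obtain ⟨j, hj⟩ := (PySem.Chars.exists_prefix_drop_iff_isIn m s).mpr
            ((PySem.Chars.isIn_iff_infix m s).mpr hinf)
          by_cases hjl : j < (pvLineSplit s).1.length
          · have hocc2 := occ_in_left m (pvLineSplit s).1 (pvLineSplit s).2 hbf (pvLineSplit_last s)
              j hjl (by rw [hlr]; exact hj)
            have : PySem.Chars.isIn m (pvLineSplit s).1 = true :=
              (PySem.Chars.exists_prefix_drop_iff_isIn m (pvLineSplit s).1).mp ⟨_, hocc2⟩
            rw [this] at hlf; exact absurd hlf (by simp)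
          · push_neg at hjl
            have : m <+: (pvLineSplit s).2.drop (j - (pvLineSplit s).1.length) := by
              have hd := pvDropAppendRight (pvLineSplit s).1 (pvLineSplit s).2 j hjl
              rw [hlr] at hd
              rw [hd] at hj
              exact hj
            have : PySem.Chars.isIn m (pvLineSplit s).2 = true :=
              (PySem.Chars.exists_prefix_drop_iff_isIn m (pvLineSplit s).2).mp ⟨_, this⟩
            rw [this] at hrf; exact absurd hrf (by simp)
  intro s
  exact main s.length s rfl

theorem hitScan_eq_neg_one_iff (m : List Char) (lines : List (List Char)) (i : Int) (hi : 0 ≤ i) :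
    pvHitScan m lines i = -1 ↔ ∀ l ∈ lines, PySem.Chars.isIn m l = false := by
  induction lines generalizing i with
  | nil => simp [pvHitScan]
  | cons ln rest ih =>
    simp only [pvHitScan]
    by_cases h : PySem.Chars.isIn m ln
    · simp [h]; omega
    · simp [h, ih (i + 1) (by omega)]

theorem clampIdx_min (n : ℕ) (e : Int) : PySem.List.clampIdx n (min (n : Int) e) = PySem.List.clampIdx n e := by
  unfold PySem.List.clampIdx
  split_ifs <;> omega

theorem slice_min_stop {α : Type} (xs : List α) (a e : Int) :
    PySem.List.slice xs (some a) (some (min (xs.length : Int) e)) = PySem.List.slice xs (some a) (some e) := by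
  simp [PySem.List.slice, clampIdx_min]

theorem slice_all {α : Type} (xs : List α) (k : Int) (hk : (xs.length : Int) ≤ k) :
    PySem.List.slice xs (some (-k)) none = xs := by
  rw [PySem.List.slice_some_none]
  have : PySem.List.clampIdx xs.length (-k) = 0 := by
    unfold PySem.List.clampIdx; split_ifs <;> omega
  simp [this]

-- ===== VERDICT (by name: the statement is the Claim_ definition above) =====
theorem window_by_lines_with_index_spec : Claim_equal_window_by_lines_with_index := by
  unfold Claim_equal_window_by_lines_with_index
  intro text before after _
  unfold Spec_window_by_lines_with_index
  unfold window_by_lines_with_index window_by_lines_with_index_alt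
  by_cases h0 : text.toList = []
  · simp [h0]
  · simp only [h0, if_false]
    rw [PySem.Str.find_eq]
    have hmne : pvMask.toList ≠ [] := by simp [pvMask]
    have hbf : ∀ c ∈ pvMask.toList, c ≠ '\n' ∧ c ≠ '\r' := by
      have h : pvMask.toList = ['<', 'I', 'F', 'M', 'A', 'S', 'K', '>'] := by simp [pvMask]
      rw [h]
      intro c hc
      simp only [List.mem_cons, List.not_mem_nil, or_false] at hc
      rcases hc with rfl | rfl | rfl | rfl | rfl | rfl | rfl | rfl <;> exact ⟨by decide, by decide⟩
    by_cases hf : PySem.Chars.find text.toList pvMask.toList = -1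
    · have hin : PySem.Chars.isIn pvMask.toList text.toList = false := by
        simp [PySem.Chars.isIn, hf]
      have hall := (notfound_iff pvMask.toList hmne hbf text.toList).mp hin
      have hscan : pvHitScan pvMask.toList (pvSplitKeep text.toList) 0 = -1 :=
        (hitScan_eq_neg_one_iff pvMask.toList _ 0 (by omega)).mpr hall
      simp only [hf, hscan, if_pos rfl, if_true]
      by_cases hkeep : before + after + 1 < ((pvSplitKeep text.toList).length : Int)
      · simp [hkeep]
      · simp only [hkeep, if_false]
        rw [slice_all _ _ (by omega)]
    · have hf0 : 0 ≤ PySem.Chars.find text.toList pvMask.toList := by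
        have := PySem.Chars.neg_one_le_find text.toList pvMask.toList; omega
      have hin : PySem.Chars.isIn pvMask.toList text.toList = true := by
        simp [PySem.Chars.isIn, bne, hf]
      have hG := hit_eq pvMask.toList hmne hbf text.toList 0 0 hin
      rw [zero_add] at hG
      have hscan_ne : pvHitScan pvMask.toList (pvSplitKeep text.toList) 0 ≠ -1 := by
        intro hEq
        have := (hitScan_eq_neg_one_iff pvMask.toList _ 0 (by omega)).mp hEq
        have := (notfound_iff pvMask.toList hmne hbf text.toList).mpr this
        rw [hin] at this; exact absurd this (by simp)
      simp only [hf, hscan_ne, if_false, hG]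
      rw [slice_min_stop]
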